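-- pv_equiv track=rewrite | github.com/jonojace/fairseq | examples/speech_audio_corrector/Hubert_ASR_generate_transcripts.py | reduce_tokens
-- ===== SOURCE A (Python) =====
-- from itertools import groupby
--
-- def reduce_tokens(
--         tokens,
--         pad_symbol="<pad>",
--         word_boundary_symbol="|",
--         remove_epsilons=True,
--         no_repeat_epsilons=False,
--         no_repeat_word_boundaries=False,
--         no_repeat_graphemes=False,
-- ):
--     """
--     reduce a sequence of CTC output tokens that contains
--
--     args:
--         tokens: list of CTC model tokens to reduce
--         remove_epsilons: whether or not to leave epsilons in
--         no_repeat_epsilons: whether to reduce repeated epsilons to just one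
--         no_repeat_graphemes: whether to reduce repeated graphemes to just one
--     """
--     reduced_tokens = []
--     all_symbols = []
--     all_durations = []
--
--     for symbol, group in groupby(tokens):
--         duration = sum(1 for _ in group)
--         all_symbols.append(symbol)
--         all_durations.append(duration)
--
--         if symbol == pad_symbol:
--             if remove_epsilons:
--                 pass
--             elif no_repeat_epsilons:
--                 reduced_tokens.append(symbol)
--             else:
--                 reduced_tokens.extend(duration * [symbol])
--         elif symbol == word_boundary_symbol:
--             if no_repeat_word_boundaries:
--                 reduced_tokens.append(symbol)
--             else:
--                 reduced_tokens.extend(duration * [symbol])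
--         else:
--             if no_repeat_graphemes:
--                 reduced_tokens.append(symbol)
--             else:
--                 reduced_tokens.extend(duration * [symbol])
--
--     return reduced_tokens, all_symbols, all_durations
-- ===== SOURCE B (Python) =====
-- def reduce_tokens(
--         tokens,
--         pad_symbol="<pad>",
--         word_boundary_symbol="|",
--         remove_epsilons=True,
--         no_repeat_epsilons=False,
--         no_repeat_word_boundaries=False,
--         no_repeat_graphemes=False,
-- ):
--     # Pair every token with its predecessor; a token is a run-start iff it
--     # differs from its predecessor (the first token always is).
--     n = len(tokens)
--     pairs = list(zip(tokens, [None] + tokens[:-1]))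
--
--     starts = [i for i, (t, p) in enumerate(pairs) if t != p]
--     all_symbols = [t for t, p in pairs if t != p]
--     # duration of each run = distance between consecutive run-start indices
--     all_durations = [j - i for i, j in zip(starts, starts[1:] + [n])]
--
--     def keep(t, is_start):
--         if t == pad_symbol:
--             if remove_epsilons:
--                 return False
--             return is_start or not no_repeat_epsilons
--         if t == word_boundary_symbol:
--             return is_start or not no_repeat_word_boundaries
--         return is_start or not no_repeat_graphemes
--
--     reduced_tokens = [t for t, p in pairs if keep(t, t != p)]
--     return reduced_tokens, all_symbols, all_durations
-- ===== Notes on version B (the rewrite author's own statement) =====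
-- stated objective: alternative
-- what changed: B abandons A's run-length grouping (groupby + per-run duration counting and expansion): it pairs every token with its predecessor, filters element-wise (a token is kept iff it is a run-start or its category's no-repeat flag is off, pads dropped under remove_epsilons), takes run-start tokens as all_symbols, and computes all_durations as differences of consecutive run-start indices.
import Mathlib
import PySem

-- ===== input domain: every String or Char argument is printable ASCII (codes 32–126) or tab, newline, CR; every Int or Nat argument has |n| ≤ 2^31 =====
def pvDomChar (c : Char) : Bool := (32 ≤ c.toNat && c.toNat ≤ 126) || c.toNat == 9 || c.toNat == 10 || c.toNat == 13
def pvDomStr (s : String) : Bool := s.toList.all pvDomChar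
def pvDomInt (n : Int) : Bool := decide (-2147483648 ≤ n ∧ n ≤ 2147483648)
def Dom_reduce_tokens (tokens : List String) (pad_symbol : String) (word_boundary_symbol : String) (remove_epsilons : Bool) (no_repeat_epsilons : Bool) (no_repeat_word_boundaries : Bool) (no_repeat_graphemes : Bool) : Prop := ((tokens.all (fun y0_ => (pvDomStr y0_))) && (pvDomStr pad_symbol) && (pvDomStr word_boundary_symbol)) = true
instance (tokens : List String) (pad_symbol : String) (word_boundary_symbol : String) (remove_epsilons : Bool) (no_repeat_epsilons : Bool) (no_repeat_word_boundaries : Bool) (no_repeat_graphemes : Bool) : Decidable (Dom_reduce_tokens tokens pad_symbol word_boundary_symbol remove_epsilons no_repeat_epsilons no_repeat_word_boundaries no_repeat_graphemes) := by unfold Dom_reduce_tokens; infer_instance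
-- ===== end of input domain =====

-- B drops A's run-length grouping entirely: it marks run-starts by comparing each token
-- with its predecessor, filters element-wise, and gets durations as differences of
-- consecutive run-start indices (objective: alternative; same asymptotic cost).

-- ===== PORT A =====
-- itertools.groupby followed by `sum(1 for _ in group)`: each run as (symbol, duration)
def pyGroupby : List String → List (String × Nat)
  | [] => []
  | x :: xs =>
    (x, 1 + (xs.takeWhile (· == x)).length) :: pyGroupby (xs.dropWhile (· == x))
termination_by xs => xs.length
decreasing_by
  exact Nat.lt_succ_of_le (List.length_dropWhile_le _ _)

def reduce_tokens (tokens : List String) (pad_symbol : String) (word_boundary_symbol : String) (remove_epsilons : Bool) (no_repeat_epsilons : Bool) (no_repeat_word_boundaries : Bool) (no_repeat_graphemes : Bool) : List String × List String × List Int :=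
  (pyGroupby tokens).foldl
    (fun acc sg =>
      let all_symbols := acc.2.1 ++ [sg.1]
      let all_durations := acc.2.2 ++ [(sg.2 : Int)]
      let reduced_tokens :=
        if sg.1 == pad_symbol then
          if remove_epsilons then acc.1
          else if no_repeat_epsilons then acc.1 ++ [sg.1]
          else acc.1 ++ List.replicate sg.2 sg.1
        else if sg.1 == word_boundary_symbol then
          if no_repeat_word_boundaries then acc.1 ++ [sg.1]
          else acc.1 ++ List.replicate sg.2 sg.1
        else
          if no_repeat_graphemes then acc.1 ++ [sg.1]
          else acc.1 ++ List.replicate sg.2 sg.1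
      (reduced_tokens, all_symbols, all_durations))
    ([], [], [])

-- ===== PORT B =====
-- Source B's nested `keep(t, is_start)` helper, flag precedence exactly as written there
def keepTok (pad_symbol word_boundary_symbol : String) (remove_epsilons no_repeat_epsilons no_repeat_word_boundaries no_repeat_graphemes : Bool) (t : String) (is_start : Bool) : Bool :=
  if t == pad_symbol then
    if remove_epsilons then false
    else (is_start || !no_repeat_epsilons)
  else if t == word_boundary_symbol then (is_start || !no_repeat_word_boundaries)
  else (is_start || !no_repeat_graphemes)

def reduce_tokens_alt (tokens : List String) (pad_symbol : String) (word_boundary_symbol : String) (remove_epsilons : Bool) (no_repeat_epsilons : Bool) (no_repeat_word_boundaries : Bool) (no_repeat_graphemes : Bool) : List String × List String × List Int :=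
  let n : Int := tokens.length
  -- zip(tokens, [None] + tokens[:-1]): Lean's zip truncates exactly like Python's
  let pairs : List (String × Option String) := tokens.zip ((none : Option String) :: tokens.map some)
  let starts : List Int := ((PySem.List.enumerate pairs).filter (fun ip => !(some ip.2.1 == ip.2.2))).map Prod.fst
  let all_symbols : List String := (pairs.filter (fun tp => !(some tp.1 == tp.2))).map Prod.fst
  let all_durations : List Int := (starts.zip (starts.drop 1 ++ [n])).map (fun ab => ab.2 - ab.1)
  let reduced : List String := (pairs.filter (fun tp => keepTok pad_symbol word_boundary_symbol remove_epsilons no_repeat_epsilons no_repeat_word_boundaries no_repeat_graphemes tp.1 (!(some tp.1 == tp.2)))).map Prod.fst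
  (reduced, all_symbols, all_durations)

-- ===== PRECONDITION & SPEC =====
def Spec_reduce_tokens (tokens : List String) (pad_symbol : String) (word_boundary_symbol : String) (remove_epsilons : Bool) (no_repeat_epsilons : Bool) (no_repeat_word_boundaries : Bool) (no_repeat_graphemes : Bool) (out : List String × List String × List Int) : Prop := out = reduce_tokens_alt tokens pad_symbol word_boundary_symbol remove_epsilons no_repeat_epsilons no_repeat_word_boundaries no_repeat_graphemes
instance (tokens : List String) (pad_symbol : String) (word_boundary_symbol : String) (remove_epsilons : Bool) (no_repeat_epsilons : Bool) (no_repeat_word_boundaries : Bool) (no_repeat_graphemes : Bool) (out : List String × List String × List Int) : Decidable (Spec_reduce_tokens tokens pad_symbol word_boundary_symbol remove_epsilons no_repeat_epsilons no_repeat_word_boundaries no_repeat_graphemes out) := by unfold Spec_reduce_tokens; infer_instance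

-- ===== CLAIM (what is proved, stated in full; the proofs are below) =====
def Claim_equal_reduce_tokens : Prop := ∀ (tokens : List String) (pad_symbol : String) (word_boundary_symbol : String) (remove_epsilons : Bool) (no_repeat_epsilons : Bool) (no_repeat_word_boundaries : Bool) (no_repeat_graphemes : Bool), Dom_reduce_tokens tokens pad_symbol word_boundary_symbol remove_epsilons no_repeat_epsilons no_repeat_word_boundaries no_repeat_graphemes → Spec_reduce_tokens tokens pad_symbol word_boundary_symbol remove_epsilons no_repeat_epsilons no_repeat_word_boundaries no_repeat_graphemes (reduce_tokens tokens pad_symbol word_boundary_symbol remove_epsilons no_repeat_epsilons no_repeat_word_boundaries no_repeat_graphemes)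

-- ===== LEMMAS AND PROOFS =====

-- unfolding equations for the well-founded pyGroupby
theorem pyGroupby_nil : pyGroupby [] = [] := by rw [pyGroupby.eq_def]
theorem pyGroupby_cons (x : String) (xs : List String) :
    pyGroupby (x :: xs)
      = (x, 1 + (xs.takeWhile (· == x)).length) :: pyGroupby (xs.dropWhile (· == x)) := by
  rw [pyGroupby.eq_def]

-- per-run contribution of A's reduced_tokens branch
def expandRun (pad wb : String) (re nre nrwb nrg : Bool) (sg : String × Nat) : List String :=
  if sg.1 == pad then
    if re then []
    else if nre then [sg.1] else List.replicate sg.2 sg.1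
  else if sg.1 == wb then
    if nrwb then [sg.1] else List.replicate sg.2 sg.1
  else
    if nrg then [sg.1] else List.replicate sg.2 sg.1

-- A's single fold over the run table, split into three independent passes
theorem foldl_eq (pad wb : String) (re nre nrwb nrg : Bool) (rs : List (String × Nat)) :
    ∀ (r s : List String) (d : List Int),
    rs.foldl
      (fun acc sg =>
        let all_symbols := acc.2.1 ++ [sg.1]
        let all_durations := acc.2.2 ++ [(sg.2 : Int)]
        let reduced_tokens :=
          if sg.1 == pad then
            if re then acc.1
            else if nre then acc.1 ++ [sg.1]
            else acc.1 ++ List.replicate sg.2 sg.1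
          else if sg.1 == wb then
            if nrwb then acc.1 ++ [sg.1]
            else acc.1 ++ List.replicate sg.2 sg.1
          else
            if nrg then acc.1 ++ [sg.1]
            else acc.1 ++ List.replicate sg.2 sg.1
        (reduced_tokens, all_symbols, all_durations)) (r, s, d)
      = (r ++ rs.flatMap (expandRun pad wb re nre nrwb nrg),
         s ++ rs.map Prod.fst,
         d ++ rs.map (fun p => (p.2 : Int))) := by
  induction rs with
  | nil => intro r s d; simp
  | cons sg rs ih =>
    intro r s d
    simp only [List.foldl_cons, ih, List.flatMap_cons, List.map_cons]
    unfold expandRun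
    split_ifs <;> simp

-- generalized predecessor-pairing (the port's `pairs` with an arbitrary first predecessor)
def pairsFrom (prev : Option String) (ts : List String) : List (String × Option String) :=
  ts.zip (prev :: ts.map some)

theorem pairsFrom_cons (prev : Option String) (t : String) (ts : List String) :
    pairsFrom prev (t :: ts) = (t, prev) :: pairsFrom (some t) ts := by
  simp [pairsFrom]

-- ----- all_symbols -----
def symAux (prev : Option String) (ts : List String) : List String :=
  ((pairsFrom prev ts).filter (fun tp => !(some tp.1 == tp.2))).map Prod.fst

theorem symAux_cons (prev : Option String) (t : String) (ts : List String) :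
    symAux prev (t :: ts)
      = (if some t == prev then [] else [t]) ++ symAux (some t) ts := by
  simp only [symAux, pairsFrom_cons, List.filter_cons]
  by_cases h : (some t == prev) = true <;> simp [h]

theorem symAux_run (xs : List String) (x : String) :
    symAux (some x) xs = symAux none (xs.dropWhile (· == x)) := by
  induction xs with
  | nil => rfl
  | cons t ts ih =>
    by_cases h : (t == x) = true
    · have ht : t = x := by exact eq_of_beq h
      subst ht
      simp [symAux_cons, List.dropWhile_cons, ih]
    · have hne : (some t == some x) = false := by
        simp only [beq_eq_false_iff_ne, ne_eq, Option.some.injEq]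
        intro hc; exact h (by simp [hc])
      simp [List.dropWhile_cons, h, symAux_cons, hne, ih]

theorem sym_eq (ts : List String) :
    symAux none ts = (pyGroupby ts).map Prod.fst := by
  induction ts using pyGroupby.induct with
  | case1 => simp [symAux, pairsFrom, pyGroupby_nil]
  | case2 x xs ih =>
    simp [symAux_cons, symAux_run, pyGroupby_cons, ih]

-- ----- reduced_tokens -----
def redAux (pad wb : String) (re nre nrwb nrg : Bool) (prev : Option String) (ts : List String) : List String :=
  ((pairsFrom prev ts).filter (fun tp => keepTok pad wb re nre nrwb nrg tp.1 (!(some tp.1 == tp.2)))).map Prod.fst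

theorem redAux_cons (pad wb : String) (re nre nrwb nrg : Bool) (prev : Option String) (t : String) (ts : List String) :
    redAux pad wb re nre nrwb nrg prev (t :: ts)
      = (if keepTok pad wb re nre nrwb nrg t (!(some t == prev)) then [t] else [])
        ++ redAux pad wb re nre nrwb nrg (some t) ts := by
  simp only [redAux, pairsFrom_cons, List.filter_cons]
  by_cases h : keepTok pad wb re nre nrwb nrg t (!(some t == prev)) = true <;> simp [h]

theorem redAux_run (pad wb : String) (re nre nrwb nrg : Bool) (xs : List String) (x : String) :
    redAux pad wb re nre nrwb nrg (some x) xs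
      = (List.replicate (xs.takeWhile (· == x)).length
          (if keepTok pad wb re nre nrwb nrg x false then [x] else [])).flatten
        ++ redAux pad wb re nre nrwb nrg none (xs.dropWhile (· == x)) := by
  induction xs with
  | nil => rfl
  | cons t ts ih =>
    by_cases h : (t == x) = true
    · have ht : t = x := by exact eq_of_beq h
      subst ht
      simp only [redAux_cons, List.takeWhile_cons, List.dropWhile_cons, h, if_pos rfl]
      simp [ih, List.replicate_succ]
    · have hne : (some t == some x) = false := by
        simp [Option.some.injEq]; intro hc; exact h (by simp [hc])
      simp [List.takeWhile_cons, List.dropWhile_cons, h, redAux_cons, hne]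

theorem expandRun_keep (pad wb : String) (re nre nrwb nrg : Bool) (x : String) (k : Nat) :
    expandRun pad wb re nre nrwb nrg (x, 1 + k)
      = (if keepTok pad wb re nre nrwb nrg x true then [x] else [])
        ++ (List.replicate k (if keepTok pad wb re nre nrwb nrg x false then [x] else [])).flatten := by
  unfold expandRun keepTok
  split_ifs <;> simp_all <;> simp [Nat.add_comm, List.replicate_succ]

theorem red_eq (pad wb : String) (re nre nrwb nrg : Bool) (ts : List String) :
    redAux pad wb re nre nrwb nrg none ts
      = (pyGroupby ts).flatMap (expandRun pad wb re nre nrwb nrg) := by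
  induction ts using pyGroupby.induct with
  | case1 => simp [redAux, pairsFrom, pyGroupby_nil]
  | case2 x xs ih =>
    simp only [redAux_cons, redAux_run, pyGroupby_cons, List.flatMap_cons, ih, expandRun_keep]
    simp

-- ----- all_durations -----
-- run-start indices, starting index i, predecessor prev
def sIdx (prev : Option String) (i : Int) : List String → List Int
  | [] => []
  | t :: ts => if some t == prev then sIdx (some t) (i + 1) ts
               else i :: sIdx (some t) (i + 1) ts

-- consecutive-difference list with final endpoint n
def diffs (xs : List Int) (n : Int) : List Int :=
  (xs.zip (xs.drop 1 ++ [n])).map (fun ab => ab.2 - ab.1)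

theorem diffs_nil (n : Int) : diffs [] n = [] := rfl
theorem diffs_single (x n : Int) : diffs [x] n = [n - x] := rfl
theorem diffs_cons (x y : Int) (xs : List Int) (n : Int) :
    diffs (x :: y :: xs) n = (y - x) :: diffs (y :: xs) n := by
  simp [diffs]

-- the port's starts-comprehension computes sIdx
theorem starts_eq (ts : List String) : ∀ (prev : Option String) (i : Int),
    ((PySem.List.enumerate (pairsFrom prev ts) i).filter (fun ip => !(some ip.2.1 == ip.2.2))).map Prod.fst
      = sIdx prev i ts := by
  induction ts with
  | nil => intro prev i; rfl
  | cons t ts ih =>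
    intro prev i
    simp only [pairsFrom_cons, PySem.List.enumerate_cons, List.filter_cons]
    by_cases h : (some t == prev) = true <;> simp [h, sIdx, ih]

theorem sIdx_run (xs : List String) (x : String) : ∀ (i : Int),
    sIdx (some x) i xs
      = sIdx none (i + (xs.takeWhile (· == x)).length) (xs.dropWhile (· == x)) := by
  induction xs with
  | nil => intro i; rfl
  | cons t ts ih =>
    intro i
    by_cases h : (t == x) = true
    · have ht : t = x := by exact eq_of_beq h
      subst ht
      simp only [sIdx, List.takeWhile_cons, List.dropWhile_cons, h, if_pos rfl, beq_self_eq_true]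
      rw [ih]
      have harith : ∀ (a b : Int), a = b → ∀ (l : List String), sIdx none a l = sIdx none b l := by
        intro a b hab l; rw [hab]
      apply harith
      push_cast [List.length_cons]
      ring
    · have hne : (some t == some x) = false := by
        simp [Option.some.injEq]; intro hc; exact h (by simp [hc])
      simp [sIdx, List.takeWhile_cons, List.dropWhile_cons, h, hne]

theorem sIdx_none_cons (t : String) (ts : List String) (i : Int) :
    sIdx none i (t :: ts) = i :: sIdx (some t) (i + 1) ts := by
  simp [sIdx]

theorem dur_eq (ts : List String) : ∀ (i : Int),
    diffs (sIdx none i ts) (i + ts.length)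
      = (pyGroupby ts).map (fun p => (p.2 : Int)) := by
  induction ts using pyGroupby.induct with
  | case1 => intro i; simp [sIdx, diffs_nil, pyGroupby_nil]
  | case2 x xs ih =>
    intro i
    have hlen : xs.length
        = (xs.takeWhile (· == x)).length + (xs.dropWhile (· == x)).length := by
      calc xs.length = (xs.takeWhile (· == x) ++ xs.dropWhile (· == x)).length := by
              rw [List.takeWhile_append_dropWhile]
        _ = _ := List.length_append
    rw [sIdx_none_cons, sIdx_run, pyGroupby_cons, List.map_cons]
    cases hr : xs.dropWhile (· == x) with
    | nil =>
      rw [hr] at hlen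
      rw [show sIdx none (i + 1 + ((xs.takeWhile (· == x)).length : Int)) [] = [] from rfl,
          diffs_single, pyGroupby_nil, List.map_nil]
      simp only [List.length_nil, Nat.add_zero] at hlen
      congr 1
      simp only [List.length_cons, hlen]
      push_cast
      ring
    | cons y ys =>
      rw [hr] at hlen ih
      rw [sIdx_none_cons, diffs_cons, ← sIdx_none_cons]
      have hend : i + (((x :: xs).length : Nat) : Int)
          = (i + 1 + ((xs.takeWhile (· == x)).length : Int))
            + (((y :: ys).length : Nat) : Int) := by
        simp only [List.length_cons, hlen]
        push_cast
        ring
      rw [hend, ih]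
      congr 1
      push_cast
      ring

theorem reduce_tokens_spec : Claim_equal_reduce_tokens := by
  intro tokens pad wb re nre nrwb nrg _
  show _ = _
  unfold reduce_tokens reduce_tokens_alt
  rw [foldl_eq]
  simp only [List.nil_append]
  refine congrArg₂ Prod.mk ?_ (congrArg₂ Prod.mk ?_ ?_)
  · rw [show tokens.zip ((none : Option String) :: tokens.map some) = pairsFrom none tokens from rfl]
    exact ((red_eq pad wb re nre nrwb nrg tokens).symm : _)
  · exact ((sym_eq tokens).symm : _)
  · rw [show tokens.zip ((none : Option String) :: tokens.map some) = pairsFrom none tokens from rfl,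
        starts_eq]
    have := dur_eq tokens 0
    rw [zero_add] at this
    exact this.symm
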